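-- pv_equiv track=rewrite | github.com/thegalkin/Bot-Cinema-VK-2019 | zachet(2019).py | priori
-- ===== SOURCE A (Python) =====
-- def priori(b):
--     while True:
--         if "*" in b:
--             return b.index("*"), "u"
--         if "/" in b:
--             return b.index("/"), "d"
--         if "+" in b:
--             return b.index("+"), "s"
--         if "-" in b:
--             return b.index("-"), "m"
--         if "^" in b:
--             return b.index("^"), "st"
-- ===== SOURCE B (Python) =====
-- def priori(b):
--     rank = {'*': 0, '/': 1, '+': 2, '-': 3, '^': 4}
--     code = {'*': 'u', '/': 'd', '+': 's', '-': 'm', '^': 'st'}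
--     while True:
--         best = None
--         for i, ch in enumerate(b):
--             if ch in rank and (best is None or rank[ch] < rank[best[1]]):
--                 best = (i, ch)
--         if best is not None:
--             return best[0], code[best[1]]
-- ===== Notes on version B (the rewrite author's own statement) =====
-- stated objective: alternative
-- what changed: Replaces five sequential membership+index scans with a single enumerate pass that keeps the first occurrence of the best-priority operator (strict '<' preserves first-occurrence tie-breaking); the while True is kept so operator-free input still hangs like A.
import Mathlib
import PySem

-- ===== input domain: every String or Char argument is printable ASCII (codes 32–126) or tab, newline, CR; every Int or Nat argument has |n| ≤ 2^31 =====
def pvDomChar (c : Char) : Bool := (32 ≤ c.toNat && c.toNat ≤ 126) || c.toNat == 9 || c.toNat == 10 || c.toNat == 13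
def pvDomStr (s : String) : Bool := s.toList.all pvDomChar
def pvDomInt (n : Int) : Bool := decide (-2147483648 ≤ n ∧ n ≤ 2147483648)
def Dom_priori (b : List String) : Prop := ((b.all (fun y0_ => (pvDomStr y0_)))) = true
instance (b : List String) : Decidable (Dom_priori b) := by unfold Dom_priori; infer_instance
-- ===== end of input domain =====

-- B replaces A's five sequential membership+index scans with one enumerate pass that keeps
-- the first occurrence of the best-priority operator (alternative decomposition, same cost class).


-- ===== PORT A =====
-- Each 'if c in b: return b.index(c), code' becomes a match on PySem.List.index?
-- (some j exactly when c ∈ b, j its first index).  When no operator is present the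
-- Python 'while True' never returns; Pre_priori excludes those inputs and the port
-- returns (0, "") there.
def priori (b : List String) : Int × String :=
  match PySem.List.index? b "*" with
  | some j => ((j : Int), "u")
  | none =>
  match PySem.List.index? b "/" with
  | some j => ((j : Int), "d")
  | none =>
  match PySem.List.index? b "+" with
  | some j => ((j : Int), "s")
  | none =>
  match PySem.List.index? b "-" with
  | some j => ((j : Int), "m")
  | none =>
  match PySem.List.index? b "^" with
  | some j => ((j : Int), "st")
  | none => (0, "")

-- ===== PORT B =====
-- 'ch in rank' / 'rank[ch]' : the rank dict as a partial function
def pvRank? (s : String) : Option Nat :=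
  if s = "*" then some 0 else if s = "/" then some 1 else if s = "+" then some 2
  else if s = "-" then some 3 else if s = "^" then some 4 else none

-- the code dict (B only ever applies it to operator strings)
def pvCode (s : String) : String :=
  if s = "*" then "u" else if s = "/" then "d" else if s = "+" then "s"
  else if s = "-" then "m" else "st"

-- the 'for i, ch in enumerate(b)' loop carrying the accumulator 'best'
def pvScan : List String → Int → Option (Int × String) → Option (Int × String)
  | [], _, best => best
  | s :: l, i, best =>
      pvScan l (i + 1)
        (match pvRank? s with
         | none => best
         | some r =>
           match best with
           | none => some (i, s)
           | some (_, c) => if r < (pvRank? c).getD 5 then some (i, s) else best)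

-- if best found, return it; otherwise Python's 'while True' repeats forever (outside Pre_priori)
def priori_alt (b : List String) : Int × String :=
  match pvScan b 0 none with
  | some (i, c) => (i, pvCode c)
  | none => (0, "")

-- ===== PRECONDITION & SPEC =====
-- Pre_ excludes exactly the inputs containing none of the five operator strings: there
-- Python's A (and Python's B alike) loops forever and never returns a value.
def Pre_priori (b : List String) : Prop :=
  "*" ∈ b ∨ "/" ∈ b ∨ "+" ∈ b ∨ "-" ∈ b ∨ "^" ∈ b
instance (b : List String) : Decidable (Pre_priori b) := by unfold Pre_priori; infer_instance

def pvWitness_priori : List String := ["1", "+", "2"]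

def Spec_priori (b : List String) (out : Int × String) : Prop := out = priori_alt b
instance (b : List String) (out : Int × String) : Decidable (Spec_priori b out) := by unfold Spec_priori; infer_instance

-- ===== CLAIM (what is proved, stated in full; the proofs are below) =====
def Claim_equal_priori : Prop := ∀ (b : List String), Dom_priori b → Pre_priori b → Spec_priori b (priori b)

-- ===== LEMMAS AND PROOFS =====

-- A-priority cascade with an index offset: the (position, char) winner B's pass must find.
def pvCasc : List String → Int → Option (Int × String)
  | [], _ => none
  | s :: l, i =>
    match pvRank? s, pvCasc l (i + 1) with
    | none, p => p
    | some _, none => some (i, s)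
    | some r, some (j, c) => if r ≤ (pvRank? c).getD 5 then some (i, s) else some (j, c)

def pvMerge : Option (Int × String) → Option (Int × String) → Option (Int × String)
  | none, p => p
  | some b, none => some b
  | some (j, c), some (k, d) =>
      if (pvRank? d).getD 5 < (pvRank? c).getD 5 then some (k, d) else some (j, c)

lemma pvScan_eq_merge : ∀ (l : List String) (i : Int) (best : Option (Int × String)),
    pvScan l i best = pvMerge best (pvCasc l i) := by
  intro l
  induction l with
  | nil => intro i best; cases best <;> rfl
  | cons s l ih =>
    intro i best
    simp only [pvScan, pvCasc, ih]
    rcases h : pvRank? s with _ | r <;>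
      rcases best with _ | ⟨j, c⟩ <;> rcases ht : pvCasc l (i + 1) with _ | ⟨k, d⟩ <;>
        simp only [pvMerge, h, Option.getD_some] <;> split_ifs <;> simp_all <;>
          (try (split_ifs <;> simp_all)) <;> omega

lemma pvCasc_mem : ∀ (l : List String) (i : Int) (j : Int) (d : String),
    pvCasc l i = some (j, d) → d ∈ l ∧ ∃ rd, pvRank? d = some rd := by
  intro l
  induction l with
  | nil => intro i j d h; simp [pvCasc] at h
  | cons s l ih =>
    intro i j d h
    simp only [pvCasc] at h
    rcases hs : pvRank? s with _ | r <;> rcases ht : pvCasc l (i + 1) with _ | ⟨k, e⟩ <;>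
        simp only [hs, ht] at h
    · exact absurd h (by simp)
    · cases h; rcases ih (i + 1) j d ht with ⟨hm, hr⟩
      exact ⟨List.mem_cons_of_mem _ hm, hr⟩
    · cases h; exact ⟨List.mem_cons_self, r, hs⟩
    · split_ifs at h
      · cases h; exact ⟨List.mem_cons_self, r, hs⟩
      · cases h
        rcases ih (i + 1) j d ht with ⟨hm, hr⟩
        exact ⟨List.mem_cons_of_mem _ hm, hr⟩

lemma pvRank?_char {s : String} {r : Nat} (h : pvRank? s = some r) :
    s = ["*", "/", "+", "-", "^"].getD r "x" := by
  unfold pvRank? at h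
  split_ifs at h <;> simp only [Option.some.injEq] at h <;> subst h <;> simp_all

lemma pvRank?_inj {s c : String} {r : Nat} (hs : pvRank? s = some r)
    (hc : pvRank? c = some r) : s = c := by
  rw [pvRank?_char hs, pvRank?_char hc]

-- B's winner is the first occurrence of the minimal-rank operator present.
lemma pvCasc_min : ∀ (l : List String) (i : Int) (r : Nat) (c : String),
    pvRank? c = some r →
    (∀ s r', pvRank? s = some r' → r' < r → s ∉ l) →
    c ∈ l →
    pvCasc l i = (PySem.List.index? l c).map (fun j : Nat => (i + (j : Int), c)) := by
  intro l
  induction l with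
  | nil => intro i r c _ _ hm; simp at hm
  | cons s l ih =>
    intro i r c hc hmin hm
    by_cases hs : s = c
    · subst hs
      rw [PySem.List.index?_cons_self]
      rcases ht : pvCasc l (i + 1) with _ | ⟨k, d⟩
      · simp [pvCasc, hc, ht]
      · rcases pvCasc_mem l (i + 1) k d ht with ⟨hdm, rd, hrd⟩
        have hle : r ≤ rd := by
          by_contra hlt
          exact hmin d rd hrd (by omega) (List.mem_cons_of_mem _ hdm)
        simp [pvCasc, hc, ht, hrd, hle]
    · have hm' : c ∈ l := by
        rcases List.mem_cons.mp hm with h | h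
        · exact absurd h.symm hs
        · exact h
      have hmin' : ∀ s' r', pvRank? s' = some r' → r' < r → s' ∉ l := by
        intro s' r' h1 h2 h3
        exact hmin s' r' h1 h2 (List.mem_cons_of_mem _ h3)
      have hidx : ∃ j, PySem.List.index? l c = some j := by
        have hsome := (PySem.List.index?_isSome_iff l c).mpr hm'
        rcases hj : PySem.List.index? l c with _ | j
        · rw [hj] at hsome; simp at hsome
        · exact ⟨j, rfl⟩
      rcases hidx with ⟨j0, hj0⟩
      have hne : s ≠ c := hs
      rw [PySem.List.index?_cons_of_ne l hne, hj0]
      have htail := ih (i + 1) r c hc hmin' hm'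
      rw [hj0] at htail
      rcases hrs : pvRank? s with _ | rs
      · simp only [pvCasc, hrs, htail]
        simp
        omega
      · have hrlt : r < rs := by
          have h1 : ¬ rs < r := fun hlt => hmin s rs hrs hlt List.mem_cons_self
          have h2 : rs ≠ r := fun he => hs (pvRank?_inj (he ▸ hrs) hc)
          omega
        simp only [pvCasc, hrs, htail, Option.map_some, hc, Option.getD_some]
        rw [if_neg (by omega)]
        simp
        omega

lemma index?_some_of_mem {b : List String} {c : String} (h : c ∈ b) :
    ∃ j, PySem.List.index? b c = some j := by
  have hsome := (PySem.List.index?_isSome_iff b c).mpr h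
  rcases hj : PySem.List.index? b c with _ | j
  · rw [hj] at hsome; simp at hsome
  · exact ⟨j, rfl⟩

lemma priori_alt_of_min {b : List String} {r : Nat} {c : String} {j : Nat}
    (hc : pvRank? c = some r)
    (hmin : ∀ s r', pvRank? s = some r' → r' < r → s ∉ b)
    (hm : c ∈ b) (hj : PySem.List.index? b c = some j) :
    priori_alt b = ((j : Int), pvCode c) := by
  unfold priori_alt
  rw [pvScan_eq_merge, pvCasc_min b 0 r c hc hmin hm, hj]
  simp [pvMerge]

lemma priori_eq_alt (b : List String) (h : Pre_priori b) : priori b = priori_alt b := by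
  by_cases h0 : "*" ∈ b
  · rcases index?_some_of_mem h0 with ⟨j, hj⟩
    rw [priori_alt_of_min rfl (by intro s r' _ hlt; omega) h0 hj]
    unfold priori; rw [hj]; rfl
  · have n0 := (PySem.List.index?_eq_none_iff b "*").mpr h0
    by_cases h1 : "/" ∈ b
    · rcases index?_some_of_mem h1 with ⟨j, hj⟩
      rw [priori_alt_of_min rfl ?_ h1 hj]
      · unfold priori; rw [n0, hj]; rfl
      · intro s r' hr hlt
        have hch := pvRank?_char hr
        interval_cases r' <;> simp_all
    · have n1 := (PySem.List.index?_eq_none_iff b "/").mpr h1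
      by_cases h2 : "+" ∈ b
      · rcases index?_some_of_mem h2 with ⟨j, hj⟩
        rw [priori_alt_of_min rfl ?_ h2 hj]
        · unfold priori; rw [n0, n1, hj]; rfl
        · intro s r' hr hlt
          have hch := pvRank?_char hr
          interval_cases r' <;> simp_all
      · have n2 := (PySem.List.index?_eq_none_iff b "+").mpr h2
        by_cases h3 : "-" ∈ b
        · rcases index?_some_of_mem h3 with ⟨j, hj⟩
          rw [priori_alt_of_min rfl ?_ h3 hj]
          · unfold priori; rw [n0, n1, n2, hj]; rfl
          · intro s r' hr hlt
            have hch := pvRank?_char hr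
            interval_cases r' <;> simp_all
        · have n3 := (PySem.List.index?_eq_none_iff b "-").mpr h3
          have h4 : "^" ∈ b := by
            rcases h with h | h | h | h | h <;> first | exact h | exact absurd h (by assumption)
          rcases index?_some_of_mem h4 with ⟨j, hj⟩
          rw [priori_alt_of_min rfl ?_ h4 hj]
          · unfold priori; rw [n0, n1, n2, n3, hj]; rfl
          · intro s r' hr hlt
            have hch := pvRank?_char hr
            interval_cases r' <;> simp_all

-- ===== VERDICT (by name: the statement is the Claim_ definition above) =====
theorem priori_spec : Claim_equal_priori := by
  intro b _ hpre
  unfold Spec_priori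
  exact priori_eq_alt b hpre
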